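-- pv_equiv track=rewrite | github.com/Delnold/marshallyin.com-parser | marshallyin/marshallyin/data_formatting/kanji.py | reading_meaning_kanji_separator
-- ===== SOURCE A (Python) =====
-- from typing import Tuple
--
-- def reading_meaning_kanji_separator(reading_meaning_kanji: list) -> Tuple[list, list, list]:
--     kanji = []
--     meaning = []
--     reading = []
--     for arr in reading_meaning_kanji:
--         if arr[0] == "Kanji":
--             kanji += arr[1:]
--         elif arr[0] == "Meaning":
--             meaning += arr[1:]
--         elif arr[0] == "Kunyomi" or arr[0] == "Onyomi":
--             reading.append(arr)
--     return reading, meaning, kanji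
-- ===== SOURCE B (Python) =====
-- def reading_meaning_kanji_separator(reading_meaning_kanji):
--     # Structural recursion: compute the three buckets of the tail first,
--     # then prepend/prefix this entry's contribution (built back-to-front).
--     if not reading_meaning_kanji:
--         return [], [], []
--     arr = reading_meaning_kanji[0]
--     reading, meaning, kanji = reading_meaning_kanji_separator(reading_meaning_kanji[1:])
--     tag = arr[0]
--     if tag == "Kanji":
--         return reading, meaning, arr[1:] + kanji
--     if tag == "Meaning":
--         return reading, arr[1:] + meaning, kanji
--     if tag in ("Kunyomi", "Onyomi"):
--         return [arr] + reading, meaning, kanji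
--     return reading, meaning, kanji
-- ===== Notes on version B (the rewrite author's own statement) =====
-- stated objective: alternative
-- what changed: Replaces the iterative left-to-right loop that appends to three mutable accumulators with a structural recursion that computes the tail's three buckets first and builds each bucket back-to-front by prepending this entry's contribution.
-- outside the precondition, e.g. on reading_meaning_kanji_separator([[]]): A raises IndexError, B raises IndexError
import Mathlib
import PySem

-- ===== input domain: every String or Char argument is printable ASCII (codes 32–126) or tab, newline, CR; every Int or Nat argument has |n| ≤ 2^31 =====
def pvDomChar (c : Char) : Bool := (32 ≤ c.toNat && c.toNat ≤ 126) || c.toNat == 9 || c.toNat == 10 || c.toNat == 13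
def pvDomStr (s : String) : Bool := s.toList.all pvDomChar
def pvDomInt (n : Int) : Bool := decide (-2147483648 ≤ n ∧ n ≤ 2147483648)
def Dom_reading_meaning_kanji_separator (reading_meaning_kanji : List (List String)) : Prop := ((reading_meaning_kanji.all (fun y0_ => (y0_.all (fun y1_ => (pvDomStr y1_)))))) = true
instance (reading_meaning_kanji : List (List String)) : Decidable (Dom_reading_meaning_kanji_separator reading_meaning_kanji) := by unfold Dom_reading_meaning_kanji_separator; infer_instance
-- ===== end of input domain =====

-- B replaces A's iterative loop appending to three mutable accumulators with a
-- structural recursion that buckets the tail first and prepends each entry's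
-- contribution (buckets built back-to-front); objective: alternative.

-- ===== PORT A =====
-- one left-to-right loop over the input, branching per element, appending to three accumulators
def rmkStep (st : List (List String) × List String × List String) (arr : List String) : List (List String) × List String × List String :=
  match arr.head? with          -- arr[0]; none = IndexError, excluded by Pre_
  | none => st
  | some h =>
    if h = "Kanji" then (st.1, st.2.1, st.2.2 ++ arr.drop 1)
    else if h = "Meaning" then (st.1, st.2.1 ++ arr.drop 1, st.2.2)
    else if h = "Kunyomi" ∨ h = "Onyomi" then (st.1 ++ [arr], st.2.1, st.2.2)
    else st

def reading_meaning_kanji_separator (reading_meaning_kanji : List (List String)) : List (List String) × List String × List String :=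
  reading_meaning_kanji.foldl rmkStep ([], [], [])

-- ===== PORT B =====
-- structural recursion: bucket the tail, then prefix this entry's contribution
def reading_meaning_kanji_separator_alt : List (List String) → List (List String) × List String × List String
  | [] => ([], [], [])
  | arr :: rest =>
    let (reading, meaning, kanji) := reading_meaning_kanji_separator_alt rest
    match arr.head? with        -- arr[0]; none = IndexError, excluded by Pre_
    | none => (reading, meaning, kanji)
    | some tag =>
      if tag = "Kanji" then (reading, meaning, arr.drop 1 ++ kanji)
      else if tag = "Meaning" then (reading, arr.drop 1 ++ meaning, kanji)
      else if tag = "Kunyomi" ∨ tag = "Onyomi" then (arr :: reading, meaning, kanji)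
      else (reading, meaning, kanji)

-- ===== PRECONDITION & SPEC =====
-- Pre_ excludes inputs containing an empty inner list: there A (and B) raise IndexError on arr[0].
def Pre_reading_meaning_kanji_separator (reading_meaning_kanji : List (List String)) : Prop :=
  ∀ arr ∈ reading_meaning_kanji, arr ≠ []
instance (reading_meaning_kanji : List (List String)) : Decidable (Pre_reading_meaning_kanji_separator reading_meaning_kanji) := by unfold Pre_reading_meaning_kanji_separator; infer_instance
def pvWitness_reading_meaning_kanji_separator : List (List String) :=
  [["Kanji", "a", "b"], ["Meaning", "dog"], ["Kunyomi", "ka"], ["Other"]]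

def Spec_reading_meaning_kanji_separator (reading_meaning_kanji : List (List String)) (out : List (List String) × List String × List String) : Prop := out = reading_meaning_kanji_separator_alt reading_meaning_kanji
instance (reading_meaning_kanji : List (List String)) (out : List (List String) × List String × List String) : Decidable (Spec_reading_meaning_kanji_separator reading_meaning_kanji out) := by unfold Spec_reading_meaning_kanji_separator; infer_instance

-- ===== CLAIM =====
def Claim_equal_reading_meaning_kanji_separator : Prop := ∀ (reading_meaning_kanji : List (List String)), Dom_reading_meaning_kanji_separator reading_meaning_kanji → Pre_reading_meaning_kanji_separator reading_meaning_kanji → Spec_reading_meaning_kanji_separator reading_meaning_kanji (reading_meaning_kanji_separator reading_meaning_kanji)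

-- ===== LEMMAS AND PROOFS =====
-- loop invariant for A's fold: started at (r, m, k), it appends the rest's three buckets,
-- where the rest's buckets are exactly what B computes
theorem rmk_loop (L : List (List String)) (r : List (List String)) (m k : List String) :
    L.foldl rmkStep (r, m, k)
    = ( r ++ (reading_meaning_kanji_separator_alt L).1
      , m ++ (reading_meaning_kanji_separator_alt L).2.1
      , k ++ (reading_meaning_kanji_separator_alt L).2.2 ) := by
  induction L generalizing r m k with
  | nil => simp [reading_meaning_kanji_separator_alt]
  | cons a L ih =>
    rw [List.foldl_cons]
    match ha : a.head? with
    | none =>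
      have hstep : rmkStep (r, m, k) a = (r, m, k) := by simp [rmkStep, ha]
      rw [hstep, ih]
      simp [reading_meaning_kanji_separator_alt, ha]
    | some t =>
      by_cases hk : t = "Kanji"
      · have hstep : rmkStep (r, m, k) a = (r, m, k ++ a.drop 1) := by simp [rmkStep, ha, hk]
        rw [hstep, ih]
        simp [reading_meaning_kanji_separator_alt, ha, hk]
      · by_cases hm : t = "Meaning"
        · have hstep : rmkStep (r, m, k) a = (r, m ++ a.drop 1, k) := by simp [rmkStep, ha, hm]
          rw [hstep, ih]
          simp [reading_meaning_kanji_separator_alt, ha, hm]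
        · by_cases hr : t = "Kunyomi" ∨ t = "Onyomi"
          · have hstep : rmkStep (r, m, k) a = (r ++ [a], m, k) := by simp [rmkStep, ha, hk, hm, hr]
            rw [hstep, ih]
            simp [reading_meaning_kanji_separator_alt, ha, hk, hm, hr]
          · rcases not_or.mp hr with ⟨h1, h2⟩
            have hstep : rmkStep (r, m, k) a = (r, m, k) := by simp [rmkStep, ha, hk, hm, h1, h2]
            rw [hstep, ih]
            simp [reading_meaning_kanji_separator_alt, ha, hk, hm, h1, h2]

-- ===== VERDICT =====
theorem reading_meaning_kanji_separator_spec : Claim_equal_reading_meaning_kanji_separator := by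
  intro L _ _
  unfold Spec_reading_meaning_kanji_separator reading_meaning_kanji_separator
  rw [rmk_loop L [] [] []]
  simp
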